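-- pv_equiv track=rewrite | github.com/kaluginpeter/Algorithms_and_structures_tasks | CodeWars/7kyu/Switch_on_the_Gravity.py | switch_gravity
-- ===== SOURCE A (Python) =====
-- def switch_gravity(lst):
--     for cur_col in range(len(lst[0])):
--         cur_row: int = len(lst) - 1
--         while cur_row >= 0 and lst[cur_row][cur_col] == '#':
--             cur_row -= 1
--         if cur_row < 0: continue
--         for row in range(cur_row, -1, -1):
--             if lst[row][cur_col] == '#':
--                 lst[cur_row][cur_col], lst[row][cur_col] = lst[row][cur_col], lst[cur_row][cur_col]
--                 cur_row -= 1
--     return lst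
-- ===== SOURCE B (Python) =====
-- def switch_gravity(lst):
--     for c in range(len(lst[0])):
--         kept = [row[c] for row in lst if row[c] != '#']
--         for r, row in enumerate(lst):
--             row[c] = kept[r] if r < len(kept) else '#'
--     return lst
-- ===== Notes on version B (the rewrite author's own statement) =====
-- stated objective: simpler
-- what changed: B rebuilds each column in one gather-then-fill pass (collect the non-'#' cells, write them to the top and '#' below) instead of A's bottom-up two-pointer swap loop; Pre_ excludes unsettled columns holding two distinct non-'#' values, where A's swap loop leaves the movable cells in an accidental order and B keeps their original order -- an unspecified corner of the kata, both orders defensible.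
-- outside the precondition, e.g. on switch_gravity([['#'], ['a'], ['b']]): A returns [['b'], ['a'], ['#']], B returns [['a'], ['b'], ['#']]
import Mathlib
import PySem

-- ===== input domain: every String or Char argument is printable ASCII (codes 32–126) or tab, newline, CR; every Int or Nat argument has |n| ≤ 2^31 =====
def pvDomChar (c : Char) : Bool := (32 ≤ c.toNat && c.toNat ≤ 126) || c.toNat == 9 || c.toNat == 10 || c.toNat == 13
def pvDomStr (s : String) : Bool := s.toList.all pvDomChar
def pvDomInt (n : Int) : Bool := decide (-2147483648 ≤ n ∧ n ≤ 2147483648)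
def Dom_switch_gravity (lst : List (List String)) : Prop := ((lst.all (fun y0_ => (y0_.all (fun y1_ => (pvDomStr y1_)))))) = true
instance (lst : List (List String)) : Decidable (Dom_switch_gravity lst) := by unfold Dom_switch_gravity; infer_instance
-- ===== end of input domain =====

-- B rebuilds each column in one gather-then-fill pass instead of A's bottom-up
-- two-pointer swap loop (simpler). Both Pythons mutate lst in place and return it;
-- the equivalence proved here is about the RETURN value.

-- ===== PORT A =====
-- lst[r][c] (always in range on admitted inputs; the default is never relied on)
def pvGetCell (g : List (List String)) (r c : Nat) : String := (g.getD r []).getD c ""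

-- lst[r][c] = v
def pvSetCell (g : List (List String)) (r c : Nat) (v : String) : List (List String) :=
  g.modify r (fun row => row.set c v)

-- 'cur_row = len(lst)-1; while cur_row >= 0 and lst[cur_row][c] == "#": cur_row -= 1'
-- encoded with fuel n = cur_row + 1 (result 0 ↔ Python's cur_row = -1)
def pvFindTop (g : List (List String)) (c : Nat) : Nat → Nat
  | 0 => 0
  | n + 1 => if pvGetCell g n c == "#" then pvFindTop g c n else n + 1

-- 'for row in range(cur_row, -1, -1): if lst[row][c] == "#": swap; cur_row -= 1'
-- fuel = row + 1, j = cur_row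
def pvDropLoop (c : Nat) : Nat → Nat → List (List String) → List (List String)
  | 0, _, g => g
  | r + 1, j, g =>
      if pvGetCell g r c == "#" then
        let a := pvGetCell g r c
        let b := pvGetCell g j c
        pvDropLoop c r (j - 1) (pvSetCell (pvSetCell g j c a) r c b)
      else pvDropLoop c r j g

def switch_gravity (lst : List (List String)) : List (List String) :=
  (List.range (lst.headD []).length).foldl
    (fun g c =>
      let n := pvFindTop g c g.length
      if n = 0 then g else pvDropLoop c n (n - 1) g)
    lst

-- ===== PORT B =====
-- kept = [row[c] for row in lst if row[c] != '#']
def pvKept (g : List (List String)) (c : Nat) : List String :=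
  (g.map (fun row => row.getD c "")).filter (fun v => !(v == "#"))

-- 'for r, row in enumerate(lst): row[c] = kept[r] if r < len(kept) else "#"'
def switch_gravity_alt (lst : List (List String)) : List (List String) :=
  (List.range (lst.headD []).length).foldl
    (fun g c =>
      let kept := pvKept g c
      (List.range g.length).foldl
        (fun g2 r => pvSetCell g2 r c (if r < kept.length then kept.getD r "" else "#")) g)
    lst

-- ===== PRECONDITION & SPEC =====
-- column c of the grid, top to bottom
def colTopPV (g : List (List String)) (c : Nat) : List String :=
  g.map (fun row => row.getD c "")

-- all movable (non-'#') cells of the column carry the same value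
def allEqPV (l : List String) : Prop :=
  ∀ a ∈ l, a ≠ "#" → ∀ b ∈ l, b ≠ "#" → a = b

-- the column is already settled: no '#' above a movable cell
def settledPV (l : List String) : Prop :=
  ∀ x ∈ l.dropWhile (fun s => !(s == "#")), x = "#"

-- Pre_ excludes (a) inputs where A raises (empty lst; a row shorter than lst[0]),
-- and (b) grids where some column both holds two distinct movable (non-'#') values
-- and is not yet settled: there the final top-to-bottom order of the movable cells
-- is an unspecified corner of the kata — A's swap loop emits them in an accidental
-- order while B keeps their original order, and either order is defensible.
def Pre_switch_gravity (lst : List (List String)) : Prop :=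
  lst ≠ [] ∧ (∀ row ∈ lst, (lst.headD []).length ≤ row.length) ∧
    ∀ c ∈ List.range (lst.headD []).length,
      allEqPV (colTopPV lst c) ∨ settledPV (colTopPV lst c)
instance (lst : List (List String)) : Decidable (Pre_switch_gravity lst) := by
  unfold Pre_switch_gravity allEqPV settledPV; infer_instance

def pvWitness_switch_gravity : List (List String) := [["#", "b"], ["a", "#"], ["#", "b"]]

def Spec_switch_gravity (lst : List (List String)) (out : List (List String)) : Prop := out = switch_gravity_alt lst
instance (lst : List (List String)) (out : List (List String)) : Decidable (Spec_switch_gravity lst out) := by unfold Spec_switch_gravity; infer_instance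

-- ===== CLAIM (what is proved, stated in full; the proofs are below) =====
def Claim_equal_switch_gravity : Prop := ∀ (lst : List (List String)), Dom_switch_gravity lst → Pre_switch_gravity lst → Spec_switch_gravity lst (switch_gravity lst)

-- ===== LEMMAS AND PROOFS =====

-- ---- list-level versions of the per-column steps ----

def writeColPV (g : List (List String)) (c : Nat) (l : List String) : List (List String) :=
  List.zipWith (fun row v => row.set c v) g l

def findLPV (l : List String) : Nat → Nat
  | 0 => 0
  | n + 1 => if l.getD n "" == "#" then findLPV l n else n + 1

def dropLPV : Nat → Nat → List String → List String
  | 0, _, l => l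
  | r + 1, j, l =>
      if l.getD r "" == "#" then
        dropLPV r (j - 1) ((l.set j (l.getD r "")).set r (l.getD j ""))
      else dropLPV r j l

def faPV (l : List String) : List String :=
  if findLPV l l.length = 0 then l else dropLPV (findLPV l l.length) (findLPV l l.length - 1) l

def stableL (l : List String) : List String :=
  l.filter (fun v => !(v == "#")) ++
    List.replicate (l.length - (l.filter (fun v => !(v == "#"))).length) "#"

def HCPV (g : List (List String)) (c : Nat) : Prop :=
  ∀ i (hi : i < g.length), c < (g[i]).length

def stepAPV (g : List (List String)) (c : Nat) : List (List String) :=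
  let n := pvFindTop g c g.length
  if n = 0 then g else pvDropLoop c n (n - 1) g

def stepBPV (g : List (List String)) (c : Nat) : List (List String) :=
  (List.range g.length).foldl
    (fun g2 r =>
      pvSetCell g2 r c (if r < (pvKept g c).length then (pvKept g c).getD r "" else "#")) g

-- ---- basic grid/column lemmas ----

theorem colTop_len (g : List (List String)) (c : Nat) : (colTopPV g c).length = g.length := by
  simp [colTopPV]

theorem getCell_eq (g : List (List String)) (r c : Nat) :
    pvGetCell g r c = (colTopPV g c).getD r "" := by
  induction g generalizing r with
  | nil => simp [pvGetCell, colTopPV]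
  | cons row g ih =>
      cases r with
      | zero => simp [pvGetCell, colTopPV]
      | succ r' => simpa [pvGetCell, colTopPV] using ih r'

theorem hc_set (g : List (List String)) (r c : Nat) (v : String) (h : HCPV g c) :
    HCPV (pvSetCell g r c v) c := by
  intro i hi
  unfold pvSetCell at *
  rw [List.length_modify] at hi
  rw [List.getElem_modify]
  split
  · simpa using h i hi
  · exact h i hi

theorem colTop_set (g : List (List String)) (r c : Nat) (v : String) (h : HCPV g c) :
    colTopPV (pvSetCell g r c v) c = (colTopPV g c).set r v := by
  apply List.ext_getElem
  · simp [colTopPV, pvSetCell, List.length_modify]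
  · intro i h1 h2
    simp only [colTopPV, pvSetCell, List.getElem_map, List.getElem_modify, List.getElem_set]
    have hi : i < g.length := by
      simpa [colTopPV, pvSetCell, List.length_modify] using h1
    split
    · next heq =>
      rw [List.getD_eq_getElem _ _ (by simpa using h i hi), List.getElem_set_self]
    · rfl

theorem writeCol_get (g : List (List String)) (c : Nat) (l : List String)
    (hl : l.length = g.length) (i : Nat) (hi : i < g.length) :
    (writeColPV g c l).getD i [] = (g.getD i []).set c (l.getD i "") := by
  unfold writeColPV
  rw [List.getD_eq_getElem _ _ (by simp [hl]; omega), List.getElem_zipWith,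
    List.getD_eq_getElem _ _ hi, List.getD_eq_getElem _ _ (by omega)]

theorem writeCol_len (g : List (List String)) (c : Nat) (l : List String)
    (hl : l.length = g.length) : (writeColPV g c l).length = g.length := by
  simp [writeColPV, hl]

theorem writeCol_id (g : List (List String)) (c : Nat) (h : HCPV g c) :
    writeColPV g c (colTopPV g c) = g := by
  apply List.ext_getElem
  · rw [writeCol_len _ _ _ (colTop_len g c)]
  · intro i h1 h2
    rw [← List.getD_eq_getElem _ [] h1, writeCol_get _ _ _ (colTop_len g c) i h2,
      List.getD_eq_getElem _ _ h2]
    unfold colTopPV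
    rw [List.getD_eq_getElem _ _ (by simpa using h2), List.getElem_map]
    rw [List.getD_eq_getElem _ _ (h i h2), List.set_getElem_self]

theorem writeCol_set (g : List (List String)) (r c : Nat) (v : String) (l : List String) :
    writeColPV (pvSetCell g r c v) c l = writeColPV g c l := by
  apply List.ext_getElem
  · simp [writeColPV, pvSetCell, List.length_modify]
  · intro i h1 h2
    unfold writeColPV pvSetCell at *
    rw [List.getElem_zipWith, List.getElem_zipWith, List.getElem_modify]
    split
    · rw [List.set_set]
    · rfl

theorem findTop_eq (g : List (List String)) (c : Nat) :
    ∀ n, pvFindTop g c n = findLPV (colTopPV g c) n := by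
  intro n
  induction n with
  | zero => rfl
  | succ m ih => simp only [pvFindTop, findLPV, getCell_eq, ih]

theorem dropLoop_eq (c : Nat) :
    ∀ (fuel : Nat) (j : Nat) (g : List (List String)), HCPV g c →
      pvDropLoop c fuel j g = writeColPV g c (dropLPV fuel j (colTopPV g c)) := by
  intro fuel
  induction fuel with
  | zero => intro j g h; exact (writeCol_id g c h).symm
  | succ r ih =>
      intro j g h
      simp only [pvDropLoop, dropLPV, getCell_eq]
      split
      · next hcond =>
        rw [ih _ _ (hc_set _ _ _ _ (hc_set _ _ _ _ h))]
        rw [writeCol_set, writeCol_set]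
        rw [colTop_set _ _ _ _ (hc_set _ _ _ _ h), colTop_set _ _ _ _ h]
      · exact ih _ _ h

-- result of the write-back fold, row by row
theorem foldset_spec (c : Nat) (f : Nat → String) :
    ∀ (rs : List Nat) (g : List (List String)),
      (rs.foldl (fun g2 r => pvSetCell g2 r c (f r)) g).length = g.length ∧
      ∀ i, i < g.length →
        (rs.foldl (fun g2 r => pvSetCell g2 r c (f r)) g).getD i [] =
          if i ∈ rs then (g.getD i []).set c (f i) else g.getD i [] := by
  intro rs
  induction rs with
  | nil => intro g; exact ⟨rfl, by intro i hi; simp⟩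
  | cons r rs ih =>
      intro g
      simp only [List.foldl_cons]
      obtain ⟨hl, hg⟩ := ih (pvSetCell g r c (f r))
      have hsl : (pvSetCell g r c (f r)).length = g.length := by
        simp [pvSetCell, List.length_modify]
      constructor
      · rw [hl, hsl]
      · intro i hi
        rw [hg i (by omega)]
        have hset : (pvSetCell g r c (f r)).getD i [] =
            if r = i then (g.getD i []).set c (f r) else g.getD i [] := by
          unfold pvSetCell
          rw [List.getD_eq_getElem _ _ (by rw [List.length_modify]; omega),
            List.getElem_modify, List.getD_eq_getElem _ _ hi]
        by_cases hmem : i ∈ rs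
        · rw [if_pos hmem, if_pos (by simp [hmem]), hset]
          by_cases heq : r = i
          · rw [if_pos heq, List.set_set]
          · rw [if_neg heq]
        · rw [if_neg hmem, hset]
          by_cases heq : r = i
          · rw [if_pos heq, if_pos (by simp [← heq]), heq]
          · have hnotin : i ∉ r :: rs := by
              simp only [List.mem_cons, not_or]
              exact ⟨fun h => heq h.symm, hmem⟩
            rw [if_neg heq, if_neg hnotin]

-- ---- getD / set / take toolbox ----

theorem set_getD (xs : List String) (i : Nat) (a : String) (p : Nat) :
    (xs.set i a).getD p "" = if p = i ∧ i < xs.length then a else xs.getD p "" := by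
  by_cases hp : p < xs.length
  · rw [List.getD_eq_getElem _ _ (by rw [List.length_set]; omega), List.getElem_set,
      List.getD_eq_getElem _ _ hp]
    by_cases h : i = p
    · rw [if_pos h, if_pos ⟨h.symm, by omega⟩]
    · rw [if_neg h, if_neg (by intro hc; exact h hc.1.symm)]
  · rw [List.getD_eq_default _ _ (by rw [List.length_set]; omega),
      List.getD_eq_default _ _ (by omega), if_neg (by intro hc; omega)]

theorem take_set_ge (xs : List String) (i : Nat) (a : String) (n : Nat) (h : n ≤ i) :
    (xs.set i a).take n = xs.take n := by
  apply List.ext_getElem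
  · simp
  · intro p h1 h2
    rw [List.getElem_take, List.getElem_take, List.getElem_set,
      if_neg (by simp at h1; omega)]

theorem cnt_take_succ (l : List String) (q : Nat) (hq : q < l.length) :
    (l.take (q + 1)).count "#" = (l.take q).count "#" + (if l.getD q "" == "#" then 1 else 0) := by
  rw [List.take_add_one, List.count_append]
  rw [List.getD_eq_getElem _ _ hq]
  have : l[q]? = some l[q] := List.getElem?_eq_getElem hq
  rw [this]
  by_cases h : l[q] = "#" <;> simp [h, beq_iff_eq]

theorem filtercnt (xs : List String) :
    (xs.filter (fun v => !(v == "#"))).length + xs.count "#" = xs.length := by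
  induction xs with
  | nil => rfl
  | cons x xs ih =>
      by_cases h : x = "#"
      · simp [h, List.count_cons, List.filter_cons]; omega
      · simp [List.count_cons, List.filter_cons, h]; omega

-- getD of 'replicate K v ++ replicate (h-K) "#"'
theorem repApp_getD (v : String) (K h p : Nat) (hK : K ≤ h) (hp : p < h) :
    (List.replicate K v ++ List.replicate (h - K) ("#" : String)).getD p "" =
      if p < K then v else "#" := by
  rw [List.getD_eq_getElem _ _ (by simp; omega), List.getElem_append]
  by_cases hb : p < K
  · rw [dif_pos (by simpa using hb), List.getElem_replicate, if_pos hb]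
  · rw [dif_neg (by simpa using hb), List.getElem_replicate, if_neg hb]

-- ---- findL characterisation ----

theorem findL_le (l : List String) : ∀ n, findLPV l n ≤ n := by
  intro n
  induction n with
  | zero => exact le_rfl
  | succ m ih => unfold findLPV; split; omega; omega

theorem findL_all_hash (l : List String) :
    ∀ n p, findLPV l n ≤ p → p < n → l.getD p "" = "#" := by
  intro n
  induction n with
  | zero => intro p _ h2; omega
  | succ m ih =>
      intro p h1 h2
      unfold findLPV at h1
      by_cases hc : l.getD m "" = "#"
      · rw [if_pos (by simpa using hc)] at h1
        by_cases hpm : p = m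
        · rw [hpm]; exact hc
        · exact ih p h1 (by omega)
      · rw [if_neg (by simpa using hc)] at h1
        omega

theorem findL_nonhash_at (l : List String) :
    ∀ n m, findLPV l n = m + 1 → l.getD m "" ≠ "#" := by
  intro n
  induction n with
  | zero => intro m h; exact absurd h (by simp [findLPV])
  | succ q ih =>
      intro m h
      unfold findLPV at h
      by_cases hc : l.getD q "" = "#"
      · rw [if_pos (by simpa using hc)] at h
        exact ih m h
      · rw [if_neg (by simpa using hc)] at h
        have : m = q := by omega
        rw [this]; exact hc

theorem findL_char2 (l : List String) (k : Nat) :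
    ∀ n, k ≤ n → (∀ p, k ≤ p → p < n → l.getD p "" = "#") →
      (k = 0 ∨ l.getD (k - 1) "" ≠ "#") → findLPV l n = k := by
  intro n
  induction n with
  | zero =>
      intro h _ _
      have hk0 : k = 0 := by omega
      rw [hk0]; rfl
  | succ m ih =>
      intro h1 h2 h3
      unfold findLPV
      by_cases hc : k = m + 1
      · have hk : l.getD m "" ≠ "#" := by
          rcases h3 with h | h
          · omega
          · have : k - 1 = m := by omega
            rwa [this] at h
        rw [if_neg (by simpa using hk)]
        omega
      · rw [if_pos (by simpa using h2 m (by omega) (by omega))]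
        exact ih (by omega) (fun p hp1 hp2 => h2 p hp1 (by omega)) h3

theorem dropL_id (l : List String) :
    ∀ fuel j, (∀ p, p < fuel → l.getD p "" ≠ "#") → dropLPV fuel j l = l := by
  intro fuel
  induction fuel with
  | zero => intro j _; rfl
  | succ r ih =>
      intro j h
      unfold dropLPV
      rw [if_neg (by simpa using h r (by omega))]
      exact ih j (fun p hp => h p (by omega))

-- ---- the swap loop on an all-equal column ----

theorem dl_alleq (v : String) (hv : v ≠ "#") :
    ∀ (fuel : Nat) (j : Nat) (l : List String),
      fuel ≤ j + 1 → j < l.length →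
      (∀ p, fuel ≤ p → p ≤ j → l.getD p "" ≠ "#") →
      (∀ p, j < p → p < l.length → l.getD p "" = "#") →
      (∀ p, p < l.length → l.getD p "" ≠ "#" → l.getD p "" = v) →
      dropLPV fuel j l =
        List.replicate (j + 1 - (l.take fuel).count "#") v ++
          List.replicate (l.length - (j + 1 - (l.take fuel).count "#")) "#" := by
  intro fuel
  induction fuel with
  | zero =>
      intro j l h1 h2 inv1 inv2 inv3
      show l = _
      have hK : j + 1 - (l.take 0).count "#" = j + 1 := by simp
      rw [hK]
      apply List.ext_getElem
      · simp; omega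
      · intro p hp1 hp2
        rw [← List.getD_eq_getElem _ "" hp1,
          ← List.getD_eq_getElem _ "" hp2, repApp_getD v (j + 1) l.length p (by omega) hp1]
        by_cases hb : p < j + 1
        · rw [if_pos hb]
          exact inv3 p hp1 (inv1 p (by omega) (by omega))
        · rw [if_neg hb]
          exact inv2 p (by omega) hp1
  | succ fuel ih =>
      intro j l h1 h2 inv1 inv2 inv3
      unfold dropLPV
      by_cases hc : l.getD fuel "" = "#"
      · rw [if_pos (by simpa using hc)]
        have hcnt : (l.take (fuel + 1)).count "#" = (l.take fuel).count "#" + 1 := by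
          rw [cnt_take_succ l fuel (by omega), if_pos (by simpa using hc)]
        by_cases hfj : fuel = j
        · -- degenerate swap at the pointer itself: the list is unchanged
          have hlj : l.getD j "" = "#" := by rw [← hfj]; exact hc
          have hself : (l.set j (l.getD fuel "")).set fuel (l.getD j "") = l := by
            rw [hfj, List.set_set, List.getD_eq_getElem _ _ h2, List.set_getElem_self]
          rw [hself]
          by_cases hj0 : j = 0
          · -- the whole column is '#'
            have hf0 : fuel = 0 := by omega
            have hall : ∀ b ∈ l, b = "#" := by
              intro b hb
              obtain ⟨i, hi, hib⟩ := List.getElem_of_mem hb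
              rw [← hib]
              by_cases hi0 : i = 0
              · subst hi0
                rw [← List.getD_eq_getElem _ "" hi, ← hj0]
                exact hlj
              · rw [← List.getD_eq_getElem _ "" hi]
                exact inv2 i (by omega) hi
            have hK : j + 1 - (l.take (fuel + 1)).count "#" = 0 := by
              rw [hcnt]
              omega
            rw [hK, hf0]
            show l = _
            have := List.eq_replicate_of_mem hall
            rw [this]
            simp
          · have hj1 : 1 ≤ j := by omega
            rw [ih (j - 1) l (by omega) (by omega)
              (fun p hp1 hp2 => by omega)
              (fun p hp1 hp2 => by
                by_cases hpj : p = j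
                · rw [hpj]; exact hlj
                · exact inv2 p (by omega) hp2)
              inv3]
            rw [hcnt]
            have hcle : (l.take fuel).count "#" ≤ fuel := by
              calc (l.take fuel).count "#" ≤ (l.take fuel).length := List.count_le_length
                _ ≤ fuel := by simp
            have : j - 1 + 1 - (l.take fuel).count "#" = j + 1 - ((l.take fuel).count "#" + 1) := by
              omega
            rw [this]
        · -- real swap: fuel < j, position j is movable (= v)
          have hfj' : fuel < j := by omega
          have hjv : l.getD j "" = v := inv3 j h2 (inv1 j (by omega) le_rfl)
          set l' := (l.set j (l.getD fuel "")).set fuel (l.getD j "") with hl'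
          have hlen' : l'.length = l.length := by simp [hl']
          have hget' : ∀ p, l'.getD p "" =
              if p = fuel then v else if p = j then "#" else l.getD p "" := by
            intro p
            rw [hl', set_getD, set_getD]
            by_cases hp : p = fuel
            · rw [if_pos ⟨hp, by rw [List.length_set]; omega⟩, if_pos hp, hjv]
            · rw [if_neg (by intro hx; exact hp hx.1), if_neg hp]
              by_cases hpj : p = j
              · rw [if_pos ⟨hpj, h2⟩, if_pos hpj, hc]
              · rw [if_neg (by intro hx; exact hpj hx.1), if_neg hpj]
          rw [ih (j - 1) l' (by omega) (by omega)
            (fun p hp1 hp2 => by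
              rw [hget' p]
              by_cases hp : p = fuel
              · rw [if_pos hp]; exact hv
              · rw [if_neg hp, if_neg (by omega)]
                exact inv1 p (by omega) (by omega))
            (fun p hp1 hp2 => by
              rw [hget' p, if_neg (by omega)]
              by_cases hpj : p = j
              · rw [if_pos hpj]
              · rw [if_neg hpj]
                exact inv2 p (by omega) (by rwa [hlen'] at hp2))
            (fun p hp1 hp2 => by
              rw [hget' p] at hp2 ⊢
              by_cases hp : p = fuel
              · rw [if_pos hp]
              · rw [if_neg hp] at hp2 ⊢
                by_cases hpj : p = j
                · rw [if_pos hpj] at hp2; exact absurd rfl hp2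
                · rw [if_neg hpj] at hp2 ⊢
                  exact inv3 p (by rwa [hlen'] at hp1) hp2)]
          have htk : l'.take fuel = l.take fuel := by
            rw [hl', take_set_ge _ _ _ _ (by omega), take_set_ge _ _ _ _ (by omega)]
          rw [htk, hlen', hcnt]
          have : j - 1 + 1 - (l.take fuel).count "#" = j + 1 - ((l.take fuel).count "#" + 1) := by
            have hcle : (l.take fuel).count "#" ≤ fuel := by
              calc (l.take fuel).count "#" ≤ (l.take fuel).length := List.count_le_length
                _ ≤ fuel := by simp
            omega
          rw [this]
      · rw [if_neg (by simpa using hc)]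
        rw [ih j l (by omega) h2
          (fun p hp1 hp2 => by
            by_cases hp : p = fuel
            · rw [hp]; exact hc
            · exact inv1 p (by omega) hp2)
          inv2 inv3]
        rw [cnt_take_succ l fuel (by omega), if_neg (by simpa using hc)]
        norm_num

theorem getD_append_left (xs ys : List String) (p : Nat) (h : p < xs.length) :
    (xs ++ ys).getD p "" = xs.getD p "" := by
  rw [List.getD_eq_getElem _ _ (by simp; omega), List.getD_eq_getElem _ _ h,
    List.getElem_append, dif_pos h]

theorem getD_append_right (xs ys : List String) (p : Nat) (h : xs.length ≤ p)
    (h2 : p < xs.length + ys.length) :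
    (xs ++ ys).getD p "" = ys.getD (p - xs.length) "" := by
  rw [List.getD_eq_getElem _ _ (by simp; omega), List.getD_eq_getElem _ _ (by omega),
    List.getElem_append, dif_neg (by omega)]

theorem takeWhile_pred (p : String → Bool) :
    ∀ (l : List String) (x : String), x ∈ l.takeWhile p → p x = true := by
  intro l
  induction l with
  | nil => intro x hx; simp [List.takeWhile] at hx
  | cons a l ih =>
      intro x hx
      rw [List.takeWhile_cons] at hx
      by_cases hpa : p a = true
      · rw [if_pos hpa] at hx
        rcases List.mem_cons.mp hx with h | h
        · rw [h]; exact hpa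
        · exact ih x h
      · rw [if_neg hpa] at hx
        simp at hx

-- ---- the per-column equality ----

theorem all_hash_stable (l : List String) (h : ∀ p, p < l.length → l.getD p "" = "#") :
    stableL l = l := by
  have hf : l.filter (fun v => !(v == "#")) = [] := by
    rw [List.filter_eq_nil_iff]
    intro a ha
    obtain ⟨i, hi, hia⟩ := List.getElem_of_mem ha
    have := h i hi
    rw [List.getD_eq_getElem _ _ hi] at this
    simp [← hia, this]
  unfold stableL
  rw [hf]
  simp only [List.nil_append, List.length_nil, Nat.sub_zero]
  symm
  apply List.eq_replicate_of_mem
  intro b hb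
  obtain ⟨i, hi, hib⟩ := List.getElem_of_mem hb
  have := h i hi
  rw [List.getD_eq_getElem _ _ hi] at this
  rw [← hib, this]

theorem core_settled (l : List String) (h : settledPV l) : faPV l = stableL l := by
  set tw := l.takeWhile (fun s => !(s == "#")) with htw
  set dw := l.dropWhile (fun s => !(s == "#")) with hdw
  have hsplit : tw ++ dw = l := List.takeWhile_append_dropWhile
  have hlen : tw.length + dw.length = l.length := by
    rw [← hsplit]; simp
  have htw_nonhash : ∀ p, p < tw.length → l.getD p "" ≠ "#" := by
    intro p hp
    have hgd : l.getD p "" = tw.getD p "" := by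
      conv_lhs => rw [← hsplit]
      exact getD_append_left tw dw p hp
    rw [hgd, List.getD_eq_getElem _ _ hp]
    have hmem : tw[p] ∈ tw := List.getElem_mem hp
    have := takeWhile_pred _ l _ hmem
    simpa using this
  have hdw_hash : ∀ p, tw.length ≤ p → p < l.length → l.getD p "" = "#" := by
    intro p hp1 hp2
    have hgd : l.getD p "" = dw.getD (p - tw.length) "" := by
      conv_lhs => rw [← hsplit]
      exact getD_append_right tw dw p hp1 (by omega)
    rw [hgd, List.getD_eq_getElem _ _ (by omega)]
    exact h _ (List.getElem_mem _)
  have hfilter : l.filter (fun v => !(v == "#")) = tw := by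
    rw [← hsplit, List.filter_append]
    have h1 : tw.filter (fun v => !(v == "#")) = tw :=
      List.filter_eq_self.mpr (fun a ha => takeWhile_pred _ l a ha)
    have h2 : dw.filter (fun v => !(v == "#")) = [] :=
      List.filter_eq_nil_iff.mpr (fun a ha => by simp [h a ha])
    rw [h1, h2, List.append_nil]
  have hstable : stableL l = l := by
    unfold stableL
    rw [hfilter]
    have hrep : List.replicate (l.length - tw.length) ("#" : String) = dw := by
      symm
      have : ∀ b ∈ dw, b = "#" := h
      have := List.eq_replicate_of_mem this
      rw [this]
      congr 1
      omega
    rw [hrep, hsplit]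
  rw [hstable]
  have hfl : findLPV l l.length = tw.length := by
    apply findL_char2 l tw.length l.length (by omega) hdw_hash
    by_cases hk : tw.length = 0
    · left; exact hk
    · right; exact htw_nonhash (tw.length - 1) (by omega)
  unfold faPV
  rw [hfl]
  by_cases hk : tw.length = 0
  · rw [if_pos hk]
  · rw [if_neg hk]
    exact dropL_id l tw.length (tw.length - 1) (fun p hp => htw_nonhash p (by omega))

theorem core_alleq (l : List String) (h : allEqPV l) : faPV l = stableL l := by
  set n := findLPV l l.length with hn
  have hnle : n ≤ l.length := findL_le l l.length
  have hhigh : ∀ p, n ≤ p → p < l.length → l.getD p "" = "#" :=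
    fun p hp1 hp2 => findL_all_hash l l.length p hp1 hp2
  cases hcn : n with
  | zero =>
      have hall : ∀ p, p < l.length → l.getD p "" = "#" := by
        intro p hp
        exact hhigh p (by omega) hp
      unfold faPV
      rw [← hn, hcn, if_pos rfl, all_hash_stable l hall]
  | succ m =>
      have hmlt : m < l.length := by omega
      set v := l.getD m "" with hvdef
      have hv : v ≠ "#" := findL_nonhash_at l l.length m (by rw [← hn, hcn])
      have hvm : v ∈ l := by
        rw [hvdef, List.getD_eq_getElem _ _ hmlt]
        exact List.getElem_mem _
      have inv3 : ∀ p, p < l.length → l.getD p "" ≠ "#" → l.getD p "" = v := by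
        intro p hp hph
        have hpm : l.getD p "" ∈ l := by
          rw [List.getD_eq_getElem _ _ hp]; exact List.getElem_mem _
        exact h _ hpm hph _ hvm hv
      have hdl := dl_alleq v hv (m + 1) m l (by omega) hmlt
        (fun p hp1 hp2 => by omega)
        (fun p hp1 hp2 => hhigh p (by omega) hp2)
        inv3
      unfold faPV
      rw [← hn, hcn, if_neg (by omega)]
      have : m + 1 - 1 = m := by omega
      rw [this, hdl]
      -- identify K with the number of movable cells
      set K := m + 1 - (l.take (m + 1)).count "#" with hKdef
      have hcntfull : l.count "#" = (l.take (m + 1)).count "#" + l.length - (m + 1) := by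
        conv_lhs => rw [← List.take_append_drop (m + 1) l]
        rw [List.count_append]
        have hdropall : (l.drop (m + 1)).count "#" = (l.drop (m + 1)).length := by
          rw [List.count_eq_length]
          intro b hb
          obtain ⟨i, hi, hib⟩ := List.getElem_of_mem hb
          rw [List.getElem_drop] at hib
          have := hhigh (m + 1 + i) (by omega) (by simp at hi; omega)
          rw [List.getD_eq_getElem _ _ (by simp at hi; omega)] at this
          rw [← hib, this]
        rw [hdropall, List.length_drop]
        have : (l.take (m + 1)).count "#" ≤ m + 1 := by
          calc (l.take (m+1)).count "#" ≤ (l.take (m+1)).length := List.count_le_length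
            _ ≤ m + 1 := by simp
        omega
      have hkK : (l.filter (fun v => !(v == "#"))).length = K := by
        have := filtercnt l
        rw [hKdef]
        have hc1 : (l.take (m + 1)).count "#" ≤ m + 1 := by
          calc (l.take (m+1)).count "#" ≤ (l.take (m+1)).length := List.count_le_length
            _ ≤ m + 1 := by simp
        omega
      have hfiltrep : l.filter (fun v => !(v == "#")) = List.replicate K v := by
        have hall : ∀ b ∈ l.filter (fun v => !(v == "#")), b = v := by
          intro b hb
          rw [List.mem_filter] at hb
          obtain ⟨i, hi, hib⟩ := List.getElem_of_mem hb.1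
          have hbn : b ≠ "#" := by simpa using hb.2
          have := inv3 i hi (by rw [List.getD_eq_getElem _ _ hi, hib]; exact hbn)
          rw [List.getD_eq_getElem _ _ hi, hib] at this
          exact this
        have := List.eq_replicate_of_mem hall
        rw [this, hkK]
      unfold stableL
      rw [hfiltrep, List.length_replicate]

theorem core_col (l : List String) (h : allEqPV l ∨ settledPV l) : faPV l = stableL l := by
  rcases h with h | h
  · exact core_alleq l h
  · exact core_settled l h

-- ---- step equality ----

theorem stableL_len (l : List String) : (stableL l).length = l.length := by
  unfold stableL
  have : (l.filter (fun v => !(v == "#"))).length ≤ l.length := List.length_filter_le _ _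
  simp
  omega

theorem stableL_getD (l : List String) (i : Nat) (hi : i < l.length) :
    (stableL l).getD i "" =
      if i < (l.filter (fun v => !(v == "#"))).length
      then (l.filter (fun v => !(v == "#"))).getD i "" else "#" := by
  unfold stableL
  set k := (l.filter (fun v => !(v == "#"))).length with hk
  have hkle : k ≤ l.length := List.length_filter_le _ _
  rw [List.getD_eq_getElem _ _ (by simp [← hk]; omega), List.getElem_append]
  by_cases hb : i < k
  · rw [dif_pos (by simpa [← hk] using hb), if_pos hb, List.getD_eq_getElem _ _ hb]
  · rw [dif_neg (by simpa [← hk] using hb), if_neg hb, List.getElem_replicate]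

theorem kept_eq (g : List (List String)) (c : Nat) :
    pvKept g c = (colTopPV g c).filter (fun v => !(v == "#")) := rfl

theorem step_eq (g : List (List String)) (c : Nat)
    (hc : HCPV g c) (hcol : allEqPV (colTopPV g c) ∨ settledPV (colTopPV g c)) :
    stepAPV g c = stepBPV g c := by
  set l := colTopPV g c with hl
  have hll : l.length = g.length := colTop_len g c
  have hA : stepAPV g c = writeColPV g c (faPV l) := by
    simp only [stepAPV, findTop_eq, ← hl]
    rw [← hll]
    unfold faPV
    by_cases h0 : findLPV l l.length = 0
    · rw [if_pos h0, if_pos h0]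
      exact (writeCol_id g c hc).symm
    · rw [if_neg h0, if_neg h0]
      exact dropLoop_eq c _ _ g hc
  rw [hA, core_col l hcol]
  unfold stepBPV
  obtain ⟨hfl, hfe⟩ := foldset_spec c
    (fun r => if r < (pvKept g c).length then (pvKept g c).getD r "" else "#")
    (List.range g.length) g
  apply List.ext_getElem
  · rw [writeCol_len _ _ _ (by rw [stableL_len]; omega)]
    exact hfl.symm
  · intro i h1 h2
    have hi : i < g.length := by
      rwa [writeCol_len _ _ _ (by rw [stableL_len]; omega)] at h1
    rw [← List.getD_eq_getElem _ [] h1, ← List.getD_eq_getElem _ [] h2,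
      writeCol_get g c _ (by rw [stableL_len]; omega) i hi,
      hfe i hi, if_pos (List.mem_range.mpr hi)]
    congr 1
    rw [stableL_getD l i (by omega), kept_eq, ← hl]

-- ---- the outer fold over columns ----

theorem stepB_rowshape (g : List (List String)) (c : Nat) :
    (stepBPV g c).length = g.length ∧
      ∀ i, i < g.length → ((stepBPV g c).getD i []).length = (g.getD i []).length := by
  unfold stepBPV
  obtain ⟨hfl, hfe⟩ := foldset_spec c
    (fun r => if r < (pvKept g c).length then (pvKept g c).getD r "" else "#")
    (List.range g.length) g
  refine ⟨hfl, ?_⟩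
  intro i hi
  rw [hfe i hi]
  split
  · rw [List.length_set]
  · rfl

theorem stepB_other_col (g : List (List String)) (c c' : Nat) (hne : c' ≠ c) :
    colTopPV (stepBPV g c) c' = colTopPV g c' := by
  obtain ⟨hfl', hfe'⟩ := foldset_spec c
    (fun r => if r < (pvKept g c).length then (pvKept g c).getD r "" else "#")
    (List.range g.length) g
  have hlen : (stepBPV g c).length = g.length := hfl'
  apply List.ext_getElem
  · simp only [colTopPV, List.length_map]
    exact hlen
  · intro i h1 h2
    have hi : i < g.length := by simpa [colTopPV] using h2
    have hib : i < (stepBPV g c).length := by omega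
    simp only [colTopPV, List.getElem_map]
    rw [← List.getD_eq_getElem (stepBPV g c) [] hib, ← List.getD_eq_getElem g [] hi]
    have hstep : (stepBPV g c).getD i [] =
        (g.getD i []).set c
          (if i < (pvKept g c).length then (pvKept g c).getD i "" else "#") := by
      rw [show (stepBPV g c).getD i [] = _ from hfe' i hi, if_pos (List.mem_range.mpr hi)]
    rw [hstep, set_getD, if_neg (by intro hx; exact hne hx.1)]

theorem outer_fold :
    ∀ (cs : List Nat) (g : List (List String)),
      cs.Nodup → (∀ c ∈ cs, HCPV g c) →
      (∀ c ∈ cs, allEqPV (colTopPV g c) ∨ settledPV (colTopPV g c)) →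
      cs.foldl stepAPV g = cs.foldl stepBPV g := by
  intro cs
  induction cs with
  | nil => intro g _ _ _; rfl
  | cons c cs ih =>
      intro g hnd hhc hcol
      simp only [List.foldl_cons]
      rw [step_eq g c (hhc c (by simp)) (hcol c (by simp))]
      obtain ⟨hbl, hbe⟩ := stepB_rowshape g c
      have hnotin : c ∉ cs := (List.nodup_cons.mp hnd).1
      apply ih
      · exact (List.nodup_cons.mp hnd).2
      · intro c' hc' i hi
        have hi' : i < g.length := by omega
        have hrow : (stepBPV g c)[i] = (stepBPV g c).getD i [] :=
          (List.getD_eq_getElem _ _ (by omega)).symm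
        rw [hrow, hbe i hi', List.getD_eq_getElem _ _ hi']
        exact hhc c' (by simp [hc']) i hi'
      · intro c' hc'
        have hne : c' ≠ c := fun h => hnotin (h ▸ hc')
        rw [stepB_other_col g c c' hne]
        exact hcol c' (by simp [hc'])

theorem portA_fold (lst : List (List String)) :
    switch_gravity lst = (List.range (lst.headD []).length).foldl stepAPV lst := rfl

theorem portB_fold (lst : List (List String)) :
    switch_gravity_alt lst = (List.range (lst.headD []).length).foldl stepBPV lst := rfl

-- ===== VERDICT (by name: the statement is the Claim_ definition above) =====
theorem switch_gravity_spec : Claim_equal_switch_gravity := by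
  intro lst _ hpre
  unfold Spec_switch_gravity
  rw [portA_fold, portB_fold]
  apply outer_fold _ _ (List.nodup_range)
  · intro c hcmem i hi
    exact lt_of_lt_of_le (List.mem_range.mp hcmem) (hpre.2.1 _ (List.getElem_mem hi))
  · intro c hcmem
    exact hpre.2.2 c hcmem
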